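-- pv_equiv track=rewrite | github.com/yunkewang/nova-kids | enrichment/annotate.py | _activity_phrase
-- ===== SOURCE A (Python) =====
-- def _activity_phrase(tags: list[str], title: str = "") -> str | None:
--     """Return a brief activity description from tags (and title for specificity)."""
--     title_lower = title.lower()
--
--     # Sports: be more specific when title gives us context
--     if "sports" in tags:
--         if any(kw in title_lower for kw in ("skate", "skating", "ice", "rink")):
--             return "skating session"
--         if "swim" in tags or any(kw in title_lower for kw in ("swim", "pool", "aquatic")):
--             return "swim session"
--
--     # Priority-ordered activity descriptors
--     activity_map = [
--         ("storytime", "storytime"),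
--         ("stem", "STEM activity"),
--         ("arts", "arts program"),
--         ("crafts", "craft activity"),
--         ("music", "music program"),
--         ("theater", "theater performance"),
--         ("animals", "animals program"),
--         ("nature", "nature program"),
--         ("sports", "sports activity"),
--         ("swim", "swim program"),
--         ("hiking", "hike"),
--         ("cooking", "cooking class"),
--         ("fitness", "fitness class"),
--         ("workshop", "workshop"),
--         ("camp", "camp program"),
--         ("festival", "festival"),
--         ("holiday", "holiday event"),
--     ]
--     for tag, phrase in activity_map:
--         if tag in tags:
--             return phrase
--     return None
-- ===== SOURCE B (Python) =====
-- _ACTIVITY_MAP = [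
--     ("storytime", "storytime"),
--     ("stem", "STEM activity"),
--     ("arts", "arts program"),
--     ("crafts", "craft activity"),
--     ("music", "music program"),
--     ("theater", "theater performance"),
--     ("animals", "animals program"),
--     ("nature", "nature program"),
--     ("sports", "sports activity"),
--     ("swim", "swim program"),
--     ("hiking", "hike"),
--     ("cooking", "cooking class"),
--     ("fitness", "fitness class"),
--     ("workshop", "workshop"),
--     ("camp", "camp program"),
--     ("festival", "festival"),
--     ("holiday", "holiday event"),
-- ]
--
-- _TAG_INDEX = {tag: (i, phrase) for i, (tag, phrase) in enumerate(_ACTIVITY_MAP)}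
--
--
-- def _activity_phrase(tags: list[str], title: str = "") -> str | None:
--     """Return a brief activity description from tags (and title for specificity)."""
--     title_lower = title.lower()
--
--     # Sports: be more specific when title gives us context
--     if "sports" in tags:
--         if any(kw in title_lower for kw in ("skate", "skating", "ice", "rink")):
--             return "skating session"
--         if "swim" in tags or any(kw in title_lower for kw in ("swim", "pool", "aquatic")):
--             return "swim session"
--
--     # Argmin over the input tags: keep the known tag with the smallest priority index
--     best = None
--     for tag in tags:
--         entry = _TAG_INDEX.get(tag)
--         if entry is not None and (best is None or entry[0] < best[0]):
--             best = entry
--     return best[1] if best is not None else None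
-- ===== Notes on version B (the rewrite author's own statement) =====
-- stated objective: alternative
-- what changed: Instead of scanning the fixed priority table and testing each tag for membership in the input list, B builds a dict from tag to (priority index, phrase) once at module load and does a single argmin pass over the input tags, keeping the match with the smallest index.
import Mathlib
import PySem

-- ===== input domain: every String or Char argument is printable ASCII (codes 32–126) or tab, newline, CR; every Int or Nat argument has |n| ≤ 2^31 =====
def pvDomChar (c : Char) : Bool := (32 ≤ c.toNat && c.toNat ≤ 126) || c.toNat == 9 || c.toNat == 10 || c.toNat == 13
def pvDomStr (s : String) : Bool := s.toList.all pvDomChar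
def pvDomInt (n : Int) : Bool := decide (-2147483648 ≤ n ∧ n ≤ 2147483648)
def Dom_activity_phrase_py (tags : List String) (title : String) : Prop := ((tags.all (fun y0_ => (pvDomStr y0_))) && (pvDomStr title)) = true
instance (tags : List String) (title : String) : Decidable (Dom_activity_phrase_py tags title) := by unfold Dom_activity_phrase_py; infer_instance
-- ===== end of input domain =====

-- B replaces A's scan over the fixed priority table by a single argmin pass over the
-- input tags with a tag -> (priority index, phrase) dictionary (alternative decomposition).


-- ===== PORT A =====
-- the module-level priority table (shared data)
def pvActivityMap : List (String × String) :=
  [("storytime", "storytime"), ("stem", "STEM activity"), ("arts", "arts program"),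
   ("crafts", "craft activity"), ("music", "music program"), ("theater", "theater performance"),
   ("animals", "animals program"), ("nature", "nature program"), ("sports", "sports activity"),
   ("swim", "swim program"), ("hiking", "hike"), ("cooking", "cooking class"),
   ("fitness", "fitness class"), ("workshop", "workshop"), ("camp", "camp program"),
   ("festival", "festival"), ("holiday", "holiday event")]

-- A's 'for tag, phrase in activity_map: if tag in tags: return phrase'
def pvFindPhrase : List (String × String) → List String → Option String
  | [], _ => none
  | (t, p) :: rest, tags => if tags.contains t then some p else pvFindPhrase rest tags

def activity_phrase_py (tags : List String) (title : String) : Option String :=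
  let title_lower := PySem.Str.lower title
  if tags.contains "sports" then
    if ["skate", "skating", "ice", "rink"].any (fun kw => PySem.Str.isIn kw title_lower) then
      some "skating session"
    else if tags.contains "swim" ||
        ["swim", "pool", "aquatic"].any (fun kw => PySem.Str.isIn kw title_lower) then
      some "swim session"
    else pvFindPhrase pvActivityMap tags
  else pvFindPhrase pvActivityMap tags

-- ===== PORT B =====
-- _TAG_INDEX = {tag: (i, phrase) for i, (tag, phrase) in enumerate(_ACTIVITY_MAP)}
def pvTagIndex : PySem.Dict String (Int × String) :=
  PySem.Dict.ofList ((PySem.List.enumerate pvActivityMap).map (fun p => (p.2.1, (p.1, p.2.2))))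

-- B's loop: argmin over the input tags of the dict lookups
def pvBest (d : PySem.Dict String (Int × String)) (tags : List String) : Option (Int × String) :=
  tags.foldl
    (fun best t =>
      match d.get? t with
      | none => best
      | some e =>
        match best with
        | none => some e
        | some b => if e.1 < b.1 then some e else some b)
    none

def activity_phrase_py_alt (tags : List String) (title : String) : Option String :=
  let title_lower := PySem.Str.lower title
  if tags.contains "sports" then
    if ["skate", "skating", "ice", "rink"].any (fun kw => PySem.Str.isIn kw title_lower) then
      some "skating session"
    else if tags.contains "swim" ||
        ["swim", "pool", "aquatic"].any (fun kw => PySem.Str.isIn kw title_lower) then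
      some "swim session"
    else (pvBest pvTagIndex tags).map (·.2)
  else (pvBest pvTagIndex tags).map (·.2)

-- ===== PRECONDITION & SPEC =====
def Spec_activity_phrase_py (tags : List String) (title : String) (out : Option String) : Prop := out = activity_phrase_py_alt tags title
instance (tags : List String) (title : String) (out : Option String) : Decidable (Spec_activity_phrase_py tags title out) := by unfold Spec_activity_phrase_py; infer_instance

-- ===== CLAIM (what is proved, stated in full; the proofs are below) =====
def Claim_equal_activity_phrase_py : Prop := ∀ (tags : List String) (title : String), Dom_activity_phrase_py tags title → Spec_activity_phrase_py tags title (activity_phrase_py tags title)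

-- ===== LEMMAS AND PROOFS =====

-- the tag-index dict as a plain association list, enumerating m from index k
def pvIdxFrom (k : Int) : List (String × String) → List (String × (Int × String))
  | [] => []
  | (t, p) :: rest => (t, (k, p)) :: pvIdxFrom (k + 1) rest

theorem pvTagIndex_eq : pvTagIndex = PySem.Dict.mk (pvIdxFrom 0 pvActivityMap) := by decide

theorem pvIdxFrom_get?_bound (m : List (String × String)) (k : Int) (x : String)
    (e : Int × String) (h : (PySem.Dict.mk (pvIdxFrom k m)).get? x = some e) : k ≤ e.1 := by
  induction m generalizing k with
  | nil => simp [pvIdxFrom, PySem.Dict.get?] at h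
  | cons hd tl ih =>
    obtain ⟨t, p⟩ := hd
    rw [pvIdxFrom, PySem.Dict.get?_mk_cons] at h
    by_cases hx : t = x
    · simp [hx, Prod.ext_iff] at h
      omega
    · simp [hx] at h
      have := ih (k + 1) h
      omega

theorem pvBest_after (d : PySem.Dict String (Int × String)) (tags : List String) (k : Int)
    (p : String) (hb : ∀ x e, d.get? x = some e → k ≤ e.1) :
    tags.foldl
      (fun best t =>
        match d.get? t with
        | none => best
        | some e =>
          match best with
          | none => some e
          | some b => if e.1 < b.1 then some e else some b)
      (some (k, p)) = some (k, p) := by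
  induction tags with
  | nil => rfl
  | cons x xs ih =>
    simp only [List.foldl_cons]
    rcases hg : d.get? x with _ | e
    · exact ih
    · have := hb x e hg
      have : ¬ e.1 < k := by omega
      simp only [this, if_false]
      exact ih

theorem pvBest_hit (tags : List String) (t : String) (d : PySem.Dict String (Int × String))
    (k : Int) (p : String) (ht : t ∈ tags) (hget : d.get? t = some (k, p))
    (hb : ∀ x e, d.get? x = some e → k ≤ e.1)
    (hs : ∀ x e, x ≠ t → d.get? x = some e → k < e.1)
    (acc : Option (Int × String)) (hacc : acc = none ∨ ∃ b, acc = some b ∧ k < b.1) :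
    tags.foldl
      (fun best t =>
        match d.get? t with
        | none => best
        | some e =>
          match best with
          | none => some e
          | some b => if e.1 < b.1 then some e else some b)
      acc = some (k, p) := by
  induction tags generalizing acc with
  | nil => exact absurd ht (List.not_mem_nil)
  | cons x xs ih =>
    simp only [List.foldl_cons]
    by_cases hx : x = t
    · subst hx
      rw [hget]
      rcases hacc with h | ⟨b, hb', hlt⟩
      · subst h
        exact pvBest_after d xs k p hb
      · subst hb'
        show List.foldl _ (if (k, p).1 < b.1 then some (k, p) else some b) xs = some (k, p)
        rw [if_pos hlt]
        exact pvBest_after d xs k p hb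
    · have ht' : t ∈ xs := by
        rcases List.mem_cons.mp ht with h | h
        · exact absurd h.symm hx
        · exact h
      rcases hg : d.get? x with _ | e
      · exact ih ht' acc hacc
      · have hlt : k < e.1 := hs x e hx hg
        rcases hacc with h | ⟨b, hb', hltb⟩
        · subst h
          exact ih ht' (some e) (Or.inr ⟨e, rfl, hlt⟩)
        · subst hb'
          by_cases hc : e.1 < b.1
          · simp only [hc, if_true]
            exact ih ht' (some e) (Or.inr ⟨e, rfl, hlt⟩)
          · simp only [hc, if_false]
            exact ih ht' (some b) (Or.inr ⟨b, rfl, hltb⟩)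

theorem pvBest_congr (tags : List String) (d d' : PySem.Dict String (Int × String))
    (h : ∀ x ∈ tags, d.get? x = d'.get? x) (acc : Option (Int × String)) :
    tags.foldl
      (fun best t =>
        match d.get? t with
        | none => best
        | some e =>
          match best with
          | none => some e
          | some b => if e.1 < b.1 then some e else some b)
      acc =
    tags.foldl
      (fun best t =>
        match d'.get? t with
        | none => best
        | some e =>
          match best with
          | none => some e
          | some b => if e.1 < b.1 then some e else some b)
      acc := by
  induction tags generalizing acc with
  | nil => rfl
  | cons x xs ih =>
    simp only [List.foldl_cons]
    rw [h x (List.mem_cons_self)]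
    exact ih (fun y hy => h y (List.mem_cons_of_mem _ hy)) _

theorem pvBest_main (m : List (String × String)) (k : Int) (tags : List String) :
    (pvBest (PySem.Dict.mk (pvIdxFrom k m)) tags).map (·.2) = pvFindPhrase m tags := by
  induction m generalizing k with
  | nil =>
    have : pvBest (PySem.Dict.mk (pvIdxFrom k [])) tags = none := by
      unfold pvBest
      induction tags with
      | nil => rfl
      | cons x xs ih => simpa [PySem.Dict.get?] using ih
    rw [this]; rfl
  | cons hd tl ih =>
    obtain ⟨t, p⟩ := hd
    by_cases hmem : tags.contains t
    · have ht : t ∈ tags := by simpa using hmem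
      have hget : (PySem.Dict.mk (pvIdxFrom k ((t, p) :: tl))).get? t = some (k, p) := by
        rw [pvIdxFrom, PySem.Dict.get?_mk_cons]; simp
      have hb : ∀ x e, (PySem.Dict.mk (pvIdxFrom k ((t, p) :: tl))).get? x = some e → k ≤ e.1 :=
        fun x e h => pvIdxFrom_get?_bound _ k x e h
      have hs : ∀ x e, x ≠ t → (PySem.Dict.mk (pvIdxFrom k ((t, p) :: tl))).get? x = some e →
          k < e.1 := by
        intro x e hne h
        rw [pvIdxFrom, PySem.Dict.get?_mk_cons] at h
        have : (t == x) = false := by simp [Ne.symm hne]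
        simp [this] at h
        have := pvIdxFrom_get?_bound tl (k + 1) x e h
        omega
      unfold pvBest
      rw [pvBest_hit tags t _ k p ht hget hb hs none (Or.inl rfl)]
      rw [pvFindPhrase, if_pos hmem]
      rfl
    · have hne : ∀ x ∈ tags, x ≠ t := by
        intro x hx hxe
        subst hxe
        exact hmem (by simpa using hx)
      have hagree : ∀ x ∈ tags,
          (PySem.Dict.mk (pvIdxFrom k ((t, p) :: tl))).get? x =
          (PySem.Dict.mk (pvIdxFrom (k + 1) tl)).get? x := by
        intro x hx
        rw [pvIdxFrom, PySem.Dict.get?_mk_cons]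
        have : (t == x) = false := by simp [Ne.symm (hne x hx)]
        simp [this]
      unfold pvBest
      rw [pvBest_congr tags _ _ hagree none]
      have := ih (k + 1)
      unfold pvBest at this
      rw [this]
      rw [pvFindPhrase, if_neg hmem]

-- ===== VERDICT (by name: the statement is the Claim_ definition above) =====
theorem activity_phrase_py_spec : Claim_equal_activity_phrase_py := by
  intro tags title _
  unfold Spec_activity_phrase_py activity_phrase_py activity_phrase_py_alt
  have hmain : (pvBest pvTagIndex tags).map (·.2) = pvFindPhrase pvActivityMap tags := by
    rw [pvTagIndex_eq]; exact pvBest_main pvActivityMap 0 tags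
  simp only [hmain]
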